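-- pv_equiv track=rewrite | github.com/GlazkoAE/transmitter-demo | processing.py | parce_real_imag
-- ===== SOURCE A (Python) =====
-- def parce_real_imag(data: list[int], sps: int):
--     i_sig = []
--     q_sig = []
--     for sample_start_index in range(0, len(data), sps * 2):
--         i_last = sample_start_index + sps
--         q_last = sample_start_index + sps * 2
--         i_sig += data[sample_start_index:i_last]
--         q_sig += data[i_last:q_last]
--     return i_sig, q_sig
-- ===== SOURCE B (Python) =====
-- def parce_real_imag(data: list[int], sps: int):
--     i_sig = []
--     q_sig = []
--     for idx, x in enumerate(data):
--         if (idx // sps) % 2 == 0: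
--             i_sig.append(x)
--         else:
--             q_sig.append(x)
--     return i_sig, q_sig
-- ===== Notes on version B (the rewrite author's own statement) =====
-- stated objective: simpler
-- what changed: B replaces A's block-stepping loop over range(0, len, 2*sps) with two slice concatenations per step by a single element-wise pass that classifies each sample via the parity of idx // sps.
-- outside the precondition, e.g. on parce_real_imag([1, 2], -1): A returns ([], []), B returns ([1], [2]); on parce_real_imag([1], 0): A raises ValueError, B raises ZeroDivisionError
import Mathlib
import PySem

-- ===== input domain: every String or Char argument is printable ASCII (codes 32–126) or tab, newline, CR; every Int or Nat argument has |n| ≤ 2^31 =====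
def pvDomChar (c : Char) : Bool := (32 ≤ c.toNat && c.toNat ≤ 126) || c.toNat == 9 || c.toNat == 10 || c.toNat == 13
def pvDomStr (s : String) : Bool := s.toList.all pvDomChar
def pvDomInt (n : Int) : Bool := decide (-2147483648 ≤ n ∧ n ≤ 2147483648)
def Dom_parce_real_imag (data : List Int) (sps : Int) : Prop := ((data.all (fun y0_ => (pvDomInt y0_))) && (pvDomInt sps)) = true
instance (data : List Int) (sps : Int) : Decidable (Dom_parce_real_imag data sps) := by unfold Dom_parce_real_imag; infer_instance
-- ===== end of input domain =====

-- B replaces A's block-stepping loop (slices of size sps appended per 2*sps block) by a single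
-- element-wise pass classifying each sample by the parity of idx // sps; same O(n) cost, simpler.


-- ===== PORT A =====
def parce_real_imag (data : List Int) (sps : Int) : List Int × List Int :=
  (PySem.List.pyRange 0 (data.length : Int) (sps * 2)).foldl
    (fun acc sample_start_index =>
      let i_last := sample_start_index + sps
      let q_last := sample_start_index + sps * 2
      (acc.1 ++ PySem.List.slice data (some sample_start_index) (some i_last),
       acc.2 ++ PySem.List.slice data (some i_last) (some q_last)))
    ([], [])

-- ===== PORT B =====
def parce_real_imag_alt (data : List Int) (sps : Int) : List Int × List Int :=
  (PySem.List.enumerate data 0).foldl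
    (fun acc p =>
      if PySem.Int.mod (PySem.Int.floordiv p.1 sps) 2 == 0 then
        (acc.1 ++ [p.2], acc.2)
      else
        (acc.1, acc.2 ++ [p.2]))
    ([], [])

-- ===== PRECONDITION & SPEC =====
-- Pre_ restricts to the natural domain sps ≥ 1 (samples per symbol): at sps = 0 A raises
-- ValueError (range step 0) and B raises ZeroDivisionError; for negative sps A returns two empty
-- lists as an artefact of range's negative-step emptiness, a corner no caller of this splitter
-- would specify, and B's per-element classification gives another value there.
def Pre_parce_real_imag (data : List Int) (sps : Int) : Prop := 1 ≤ sps
instance (data : List Int) (sps : Int) : Decidable (Pre_parce_real_imag data sps) := by unfold Pre_parce_real_imag; infer_instance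
def pvWitness_parce_real_imag : List Int × Int := ([10, 20, 30, 40, 50], 2)

def Spec_parce_real_imag (data : List Int) (sps : Int) (out : List Int × List Int) : Prop := out = parce_real_imag_alt data sps
instance (data : List Int) (sps : Int) (out : List Int × List Int) : Decidable (Spec_parce_real_imag data sps out) := by unfold Spec_parce_real_imag; infer_instance

-- ===== CLAIM (what is proved, stated in full; the proofs are below) =====
def Claim_equal_parce_real_imag : Prop := ∀ (data : List Int) (sps : Int), Dom_parce_real_imag data sps → Pre_parce_real_imag data sps → Spec_parce_real_imag data sps (parce_real_imag data sps)

-- ===== LEMMAS AND PROOFS =====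

-- reference splitters (proof-side only): front recursion taking one 2*t block at a time
def chunksI (t : Nat) : List Int → List Int
  | [] => []
  | x :: rest => (x :: rest.take (t - 1)) ++ chunksI t (rest.drop (2 * t - 1))
  termination_by d => d.length
  decreasing_by simp [List.length_drop]; try omega

def chunksQ (t : Nat) : List Int → List Int
  | [] => []
  | x :: rest => ((x :: rest).drop t).take t ++ chunksQ t (rest.drop (2 * t - 1))
  termination_by d => d.length
  decreasing_by simp [List.length_drop]; try omega

lemma chunksI_step (t : Nat) (ht : 1 ≤ t) (d : List Int) (hd : d ≠ []) :
    chunksI t d = d.take t ++ chunksI t (d.drop (2 * t)) := by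
  cases d with
  | nil => exact absurd rfl hd
  | cons x rest =>
    obtain ⟨t', rfl⟩ : ∃ t', t = t' + 1 := ⟨t - 1, by omega⟩
    have hdrop : List.drop (2 * (t' + 1)) (x :: rest) = List.drop (2 * (t' + 1) - 1) rest := by
      rw [show 2 * (t' + 1) = (2 * (t' + 1) - 1) + 1 from by omega, List.drop_succ_cons,
        Nat.add_sub_cancel]
    rw [chunksI, hdrop, List.take_succ_cons]
    norm_num

lemma chunksQ_step (t : Nat) (ht : 1 ≤ t) (d : List Int) (hd : d ≠ []) :
    chunksQ t d = (d.drop t).take t ++ chunksQ t (d.drop (2 * t)) := by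
  cases d with
  | nil => exact absurd rfl hd
  | cons x rest =>
    obtain ⟨t', rfl⟩ : ∃ t', t = t' + 1 := ⟨t - 1, by omega⟩
    have hdrop : List.drop (2 * (t' + 1)) (x :: rest) = List.drop (2 * (t' + 1) - 1) rest := by
      rw [show 2 * (t' + 1) = (2 * (t' + 1) - 1) + 1 from by omega, List.drop_succ_cons,
        Nat.add_sub_cancel]
    rw [chunksQ, hdrop]

-- the B-side loop condition at absolute index 2*t*m + j (0 ≤ j < 2*t) is "j < t"
lemma cond_val (t m j : Nat) (ht : 1 ≤ t) (hj : j < 2 * t) :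
    (PySem.Int.mod (PySem.Int.floordiv ((2 * t * m + j : Nat) : Int) (t : Int)) 2 == 0)
      = decide (j < t) := by
  by_cases h : j < t
  · have hfd : PySem.Int.floordiv ((2 * t * m + j : Nat) : Int) (t : Int) = ((2 * m : Nat) : Int) := by
      rw [PySem.Int.floordiv_eq_iff_of_pos (by exact_mod_cast ht)]
      push_cast
      constructor <;> nlinarith
    rw [hfd, PySem.Int.mod_eq_emod_of_pos (by norm_num),
      show ((2 * m : Nat) : Int) % 2 = 0 from by push_cast; omega]
    simp [h]
  · have hfd : PySem.Int.floordiv ((2 * t * m + j : Nat) : Int) (t : Int) = ((2 * m + 1 : Nat) : Int) := by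
      rw [PySem.Int.floordiv_eq_iff_of_pos (by exact_mod_cast ht)]
      push_cast
      constructor <;> nlinarith [Nat.not_lt.mp h]
    rw [hfd, PySem.Int.mod_eq_emod_of_pos (by norm_num),
      show ((2 * m + 1 : Nat) : Int) % 2 = 1 from by push_cast; omega]
    simp [h]

-- a generic two-accumulator classify loop is a pair of filters
lemma foldl_classify (c : Int × Int → Bool) (l : List (Int × Int)) (a b : List Int) :
    l.foldl (fun acc p => if c p then (acc.1 ++ [p.2], acc.2) else (acc.1, acc.2 ++ [p.2])) (a, b)
      = (a ++ (l.filter c).map (·.2), b ++ (l.filter (fun p => !c p)).map (·.2)) := by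
  induction l generalizing a b with
  | nil => simp
  | cons p l ih =>
    by_cases h : c p <;> simp [h, ih, List.append_assoc]

-- within one block (j + w.length ≤ 2*t), the kept i-samples are w.take (t - j)
lemma filt_block_i (t : Nat) (ht : 1 ≤ t) (w : List Int) :
    ∀ (m j : Nat), j + w.length ≤ 2 * t →
      ((PySem.List.enumerate w ((2 * t * m + j : Nat) : Int)).filter
          (fun p => PySem.Int.mod (PySem.Int.floordiv p.1 (t : Int)) 2 == 0)).map (·.2)
        = w.take (t - j) := by
  induction w with
  | nil => intro m j _; simp [PySem.List.enumerate]
  | cons x w ih =>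
    intro m j hlen
    rw [PySem.List.enumerate_cons]
    have hstep : ((2 * t * m + j : Nat) : Int) + 1 = ((2 * t * m + (j + 1) : Nat) : Int) := by push_cast; ring
    rw [hstep]
    have hj : j < 2 * t := by simp at hlen; omega
    rw [List.filter_cons]
    simp only [cond_val t m j ht hj]
    have hrec := ih m (j + 1) (by simp at hlen ⊢; omega)
    by_cases h : j < t
    · have htj : t - j = (t - (j + 1)) + 1 := by omega
      rw [if_pos (by simp [h]), List.map_cons, hrec, htj, List.take_succ_cons]
    · have htj : t - j = 0 := by omega
      have htj1 : t - (j + 1) = 0 := by omega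
      rw [if_neg (by simp [h]), hrec, htj, htj1, List.take_zero, List.take_zero]

-- within one block, the kept q-samples are w.drop (t - j)
lemma filt_block_q (t : Nat) (ht : 1 ≤ t) (w : List Int) :
    ∀ (m j : Nat), j + w.length ≤ 2 * t →
      ((PySem.List.enumerate w ((2 * t * m + j : Nat) : Int)).filter
          (fun p => !(PySem.Int.mod (PySem.Int.floordiv p.1 (t : Int)) 2 == 0))).map (·.2)
        = w.drop (t - j) := by
  induction w with
  | nil => intro m j _; simp [PySem.List.enumerate]
  | cons x w ih =>
    intro m j hlen
    rw [PySem.List.enumerate_cons]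
    have hstep : ((2 * t * m + j : Nat) : Int) + 1 = ((2 * t * m + (j + 1) : Nat) : Int) := by push_cast; ring
    rw [hstep]
    have hj : j < 2 * t := by simp at hlen; omega
    rw [List.filter_cons]
    simp only [cond_val t m j ht hj]
    have hrec := ih m (j + 1) (by simp at hlen ⊢; omega)
    by_cases h : j < t
    · have htj : t - j = (t - (j + 1)) + 1 := by omega
      rw [if_neg (by simp [h]), hrec, htj, List.drop_succ_cons]
    · have htj : t - j = 0 := by omega
      have htj1 : t - (j + 1) = 0 := by omega
      rw [if_pos (by simp [h]), List.map_cons, hrec, htj, htj1, List.drop_zero, List.drop_zero]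

-- B's filters over a whole list, block by block (n is a fuel bound on the length)
lemma b_eq_chunks_fuel (t : Nat) (ht : 1 ≤ t) : ∀ (n : Nat) (u : List Int), u.length ≤ n → ∀ (m : Nat),
    ((PySem.List.enumerate u ((2 * t * m : Nat) : Int)).filter
        (fun p => PySem.Int.mod (PySem.Int.floordiv p.1 (t : Int)) 2 == 0)).map (·.2)
      = chunksI t u
    ∧ ((PySem.List.enumerate u ((2 * t * m : Nat) : Int)).filter
        (fun p => !(PySem.Int.mod (PySem.Int.floordiv p.1 (t : Int)) 2 == 0))).map (·.2)
      = chunksQ t u := by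
  intro n
  induction n with
  | zero =>
    intro u hu m
    have : u = [] := by rw [← List.length_eq_zero_iff]; omega
    subst this
    simp [PySem.List.enumerate, chunksI, chunksQ]
  | succ n ih =>
    intro u hu m
    cases hcu : u with
    | nil => simp [PySem.List.enumerate, chunksI, chunksQ]
    | cons x rest =>
    rw [← hcu]
    have hne : u ≠ [] := by simp [hcu]
    have hul : 1 ≤ u.length := by simp [hcu]
    by_cases hlong : u.length ≤ 2 * t
    · have hdrop : u.drop (2 * t) = [] := by
        rw [List.drop_eq_nil_iff]; omega
      have hi := filt_block_i t ht u m 0 (by omega)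
      have hq := filt_block_q t ht u m 0 (by omega)
      simp only [Nat.add_zero] at hi hq
      rw [chunksI_step t ht u hne, chunksQ_step t ht u hne, hdrop]
      refine ⟨by rw [hi]; simp [chunksI], ?_⟩
      rw [hq]
      simp only [chunksQ, List.append_nil, Nat.sub_zero]
      exact ((List.take_eq_self_iff _).mpr (by rw [List.length_drop]; omega)).symm
    · have hsplit : u = u.take (2 * t) ++ u.drop (2 * t) := (List.take_append_drop _ _).symm
      have hlen : (u.take (2 * t)).length = 2 * t := by
        rw [List.length_take]; omega
      have hcast : ((2 * t * m : Nat) : Int) + ((u.take (2 * t)).length : Int)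
          = ((2 * t * (m + 1) : Nat) : Int) := by
        rw [hlen]; push_cast; ring
      have ihd := ih (u.drop (2 * t)) (by rw [List.length_drop]; omega) (m + 1)
      have hi := filt_block_i t ht (u.take (2 * t)) m 0 (by rw [hlen]; omega)
      have hq := filt_block_q t ht (u.take (2 * t)) m 0 (by rw [hlen]; omega)
      simp only [Nat.add_zero] at hi hq
      constructor
      · conv_lhs => rw [hsplit]
        rw [PySem.List.enumerate_append, hcast, List.filter_append, List.map_append, hi, ihd.1,
          chunksI_step t ht u hne, Nat.sub_zero, List.take_take,
          show min t (2 * t) = t from by omega]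
      · conv_lhs => rw [hsplit]
        rw [PySem.List.enumerate_append, hcast, List.filter_append, List.map_append, hq, ihd.2,
          chunksQ_step t ht u hne, Nat.sub_zero]
        congr 1
        rw [List.drop_take]
        congr 1; omega

-- positive-step pyRange: empty and cons unfoldings
lemma pyRange_pos_nil (a b s : Int) (hs : 0 < s) (h : b ≤ a) :
    PySem.List.pyRange a b s = [] := by
  rw [PySem.List.pyRange_of_pos a b hs, if_neg (by omega)]
  simp

lemma pyRange_pos_cons (a b s : Int) (hs : 0 < s) (h : a < b) :
    PySem.List.pyRange a b s = a :: PySem.List.pyRange (a + s) b s := by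
  rw [PySem.List.pyRange_of_pos a b hs, PySem.List.pyRange_of_pos (a + s) b hs]
  by_cases h2 : a + s < b
  · rw [if_pos h, if_pos h2]
    have hc : b - a + s - 1 = (b - (a + s) + s - 1) + 1 * s := by ring
    have hnn : 0 ≤ (b - (a + s) + s - 1) / s := Int.ediv_nonneg (by omega) (by omega)
    rw [hc, Int.add_mul_ediv_right _ _ (by omega)]
    have : ((b - (a + s) + s - 1) / s + 1).toNat = ((b - (a + s) + s - 1) / s).toNat + 1 := by omega
    rw [this, List.range_succ_eq_map]
    simp only [List.map_cons, List.map_map]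
    congr 1
    · norm_num
    · apply List.map_congr_left
      intro k _
      simp only [Function.comp_apply]
      push_cast
      ring
  · rw [if_pos h, if_neg h2]
    have hdiv : (b - a + s - 1) / s = 1 := by
      rw [← PySem.Int.floordiv_eq_ediv_of_pos hs, PySem.Int.floordiv_eq_iff_of_pos hs]
      omega
    rw [hdiv]
    simp

-- A's flatMaps over the block starts, block by block
lemma a_eq_chunks (t : Nat) (ht : 1 ≤ t) (data : List Int) : ∀ (c k : Nat),
    data.length ≤ k + 2 * t * c →
    ((PySem.List.pyRange ((k : Nat) : Int) (data.length : Int) ((2 * t : Nat) : Int)).flatMap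
        (fun j => PySem.List.slice data (some j) (some (j + (t : Int))))
      = chunksI t (data.drop k))
    ∧ ((PySem.List.pyRange ((k : Nat) : Int) (data.length : Int) ((2 * t : Nat) : Int)).flatMap
        (fun j => PySem.List.slice data (some (j + (t : Int))) (some (j + (t : Int) * 2)))
      = chunksQ t (data.drop k)) := by
  intro c
  induction c with
  | zero =>
    intro k hk
    simp only [Nat.mul_zero, Nat.add_zero] at hk
    have hdrop : data.drop k = [] := by rw [List.drop_eq_nil_iff]; omega
    rw [pyRange_pos_nil _ _ _ (by omega) (by omega), hdrop]
    simp [chunksI, chunksQ]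
  | succ c ih =>
    intro k hk
    by_cases hkn : data.length ≤ k
    · have hdrop : data.drop k = [] := by rw [List.drop_eq_nil_iff]; omega
      rw [pyRange_pos_nil _ _ _ (by omega) (by omega), hdrop]
      simp [chunksI, chunksQ]
    · have hne : data.drop k ≠ [] := by
        rw [← List.length_pos_iff, List.length_drop]; omega
      rw [pyRange_pos_cons _ _ _ (by omega) (by omega)]
      have hstep : ((k : Nat) : Int) + ((2 * t : Nat) : Int) = ((k + 2 * t : Nat) : Int) := by
        push_cast; ring
      have ihk := ih (k + 2 * t) (by
        have hexp : 2 * t * (c + 1) = 2 * t * c + 2 * t := by ring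
        omega)
      have hsl1 : PySem.List.slice data (some ((k : Nat) : Int)) (some (((k : Nat) : Int) + (t : Int)))
          = (data.drop k).take t := by
        have := PySem.List.slice_natCast_add data k t
        exact this
      have hsl2 : PySem.List.slice data (some (((k : Nat) : Int) + (t : Int)))
            (some (((k : Nat) : Int) + (t : Int) * 2))
          = ((data.drop k).drop t).take t := by
        have hc1 : ((k : Nat) : Int) + (t : Int) = ((k + t : Nat) : Int) := by push_cast; ring
        have hc2 : ((k : Nat) : Int) + (t : Int) * 2 = ((k + t : Nat) : Int) + ((t : Nat) : Int) := by
          push_cast; ring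
        rw [hc1, hc2, PySem.List.slice_natCast_add data (k + t) t, List.drop_drop]
      have hdd : List.drop (2 * t) (List.drop k data) = List.drop (k + 2 * t) data := by
        rw [List.drop_drop, Nat.add_comm]
      constructor
      · rw [List.flatMap_cons, hstep, ihk.1, hsl1, chunksI_step t ht _ hne, hdd]
      · rw [List.flatMap_cons, hstep, ihk.2, hsl2, chunksQ_step t ht _ hne, hdd]

-- ===== VERDICT (by name: the statement is the Claim_ definition above) =====
theorem parce_real_imag_spec : Claim_equal_parce_real_imag := by
  intro data sps _ hpre
  unfold Spec_parce_real_imag parce_real_imag parce_real_imag_alt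
  have hpre' : 1 ≤ sps := hpre
  obtain ⟨t, ht, hts⟩ : ∃ t : Nat, 1 ≤ t ∧ sps = (t : Int) :=
    ⟨sps.toNat, by omega, by omega⟩
  subst hts
  -- B side: split the classify loop into two filters, then evaluate block by block
  have hb := b_eq_chunks_fuel t ht data.length data le_rfl 0
  have hz : ((2 * t * 0 : Nat) : Int) = 0 := by push_cast; ring
  rw [hz] at hb
  rw [foldl_classify]
  rw [hb.1, hb.2]
  -- A side: two independent accumulators, each an append loop, i.e. a flatMap over block starts
  have ha := a_eq_chunks t ht data data.length 0 (by nlinarith)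
  simp only [Nat.cast_zero, List.drop_zero] at ha
  rw [PySem.List.foldl_prod_mk
      (f := fun l j => l ++ PySem.List.slice data (some j) (some (j + (t : Int))))
      (g := fun l j => l ++ PySem.List.slice data (some (j + (t : Int))) (some (j + (t : Int) * 2)))]
  rw [PySem.List.foldl_append_eq_flatMap, PySem.List.foldl_append_eq_flatMap, List.nil_append,
    List.nil_append]
  rw [show (t : Int) * 2 = ((2 * t : Nat) : Int) from by push_cast; ring] at *
  rw [ha.1, ha.2]
  simp
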